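-- pv_equiv track=rewrite | github.com/ShahnawazDev/ip-project-evaluation | Nikhil Khowal/metro_simulator.py | metro_start
-- ===== SOURCE A (Python) =====
-- def metro_start(network_data, metroline):
--     first, last = None, None
--     for entry in network_data:
--         if entry['line'].lower() == metroline.lower():
--             if first is None:
--                 first = entry['name']
--             last = entry['name']
--     return first, last
-- ===== SOURCE B (Python) =====
-- def metro_start(network_data, metroline):
--     target = metroline.lower()
--
--     def solve(seg):
--         # divide and conquer: (first, last) of a segment from its halves
--         if not seg:
--             return None, None
--         if len(seg) == 1:
--             e = seg[0]
--             if e['line'].lower() == target: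
--                 n = e['name']
--                 return n, n
--             return None, None
--         mid = len(seg) // 2
--         lf, ll = solve(seg[:mid])
--         rf, rl = solve(seg[mid:])
--         return (lf if lf is not None else rf,
--                 rl if rl is not None else ll)
--
--     return solve(list(network_data))
-- ===== Notes on version B (the rewrite author's own statement) =====
-- stated objective: alternative
-- what changed: Replaces A's single left-to-right pass with two running sentinels by a divide-and-conquer recursion: split the data in half, compute (first,last) of each half, and merge (left's first or else right's, right's last or else left's).
import Mathlib
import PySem

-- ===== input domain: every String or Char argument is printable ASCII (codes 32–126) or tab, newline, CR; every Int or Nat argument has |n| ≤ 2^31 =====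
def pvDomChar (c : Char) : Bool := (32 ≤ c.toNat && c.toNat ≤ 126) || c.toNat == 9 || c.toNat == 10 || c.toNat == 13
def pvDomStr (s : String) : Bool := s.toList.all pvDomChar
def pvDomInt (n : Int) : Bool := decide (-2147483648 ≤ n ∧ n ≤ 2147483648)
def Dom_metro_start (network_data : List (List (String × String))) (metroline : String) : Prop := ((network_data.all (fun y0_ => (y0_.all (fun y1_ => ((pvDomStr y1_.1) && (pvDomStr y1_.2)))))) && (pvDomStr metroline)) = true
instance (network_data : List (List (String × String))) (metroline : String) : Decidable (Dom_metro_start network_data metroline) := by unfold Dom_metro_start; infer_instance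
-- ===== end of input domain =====

-- B replaces A's single accumulator pass with a divide-and-conquer recursion that merges
-- the (first,last) answers of the two halves. Objective: alternative (same cost, different algorithm).

-- ===== PORT A =====
-- entry['k'] on an association list = first match (List.lookup); Pre_ guarantees the key exists,
-- so the .getD "" default is never taken on admitted inputs.
def metro_start (network_data : List (List (String × String))) (metroline : String) : Option String × Option String :=
  network_data.foldl
    (fun st entry =>
      if PySem.Str.lower ((entry.lookup "line").getD "") == PySem.Str.lower metroline then
        ((if st.1 = none then some ((entry.lookup "name").getD "") else st.1),
         some ((entry.lookup "name").getD ""))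
      else st)
    (none, none)

-- ===== PORT B =====
-- divide and conquer on the segment, as in Source B's solve
def metroSolve (target : String) (seg : List (List (String × String))) : Option String × Option String :=
  match seg with
  | [] => (none, none)
  | [e] =>
    if PySem.Str.lower ((e.lookup "line").getD "") == target then
      (some ((e.lookup "name").getD ""), some ((e.lookup "name").getD ""))
    else (none, none)
  | a :: b :: t =>
    -- mid = len(seg) // 2; recurse on the two halves and merge
    match metroSolve target ((a :: b :: t).take ((a :: b :: t).length / 2)),
          metroSolve target ((a :: b :: t).drop ((a :: b :: t).length / 2)) with
    | (lf, ll), (rf, rl) =>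
      ((if lf ≠ none then lf else rf), (if rl ≠ none then rl else ll))
termination_by seg.length
decreasing_by
  · simp [List.length_take]; omega
  · simp [List.length_drop]; omega

def metro_start_alt (network_data : List (List (String × String))) (metroline : String) : Option String × Option String :=
  metroSolve (PySem.Str.lower metroline) network_data

-- ===== PRECONDITION & SPEC =====
-- Pre_ excludes exactly the inputs where A raises KeyError: an entry without a 'line' key,
-- or a line-matching entry without a 'name' key.
def Pre_metro_start (network_data : List (List (String × String))) (metroline : String) : Prop :=
  (network_data.all (fun entry =>
    (entry.lookup "line").isSome &&
    (!(PySem.Str.lower ((entry.lookup "line").getD "") == PySem.Str.lower metroline)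
      || (entry.lookup "name").isSome))) = true
instance (network_data : List (List (String × String))) (metroline : String) : Decidable (Pre_metro_start network_data metroline) := by unfold Pre_metro_start; infer_instance
def pvWitness_metro_start : (List (List (String × String))) × String :=
  ([[("line", "Red"), ("name", "Alpha")], [("line", "Blue"), ("name", "Beta")]], "red")

def Spec_metro_start (network_data : List (List (String × String))) (metroline : String) (out : Option String × Option String) : Prop := out = metro_start_alt network_data metroline
instance (network_data : List (List (String × String))) (metroline : String) (out : Option String × Option String) : Decidable (Spec_metro_start network_data metroline out) := by unfold Spec_metro_start; infer_instance

-- ===== CLAIM (what is proved, stated in full; the proofs are below) =====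
def Claim_equal_metro_start : Prop := ∀ (network_data : List (List (String × String))) (metroline : String), Dom_metro_start network_data metroline → Pre_metro_start network_data metroline → Spec_metro_start network_data metroline (metro_start network_data metroline)

-- ===== LEMMAS AND PROOFS =====

-- A's fold from an arbitrary state, characterised by the filtered-and-mapped match list.
theorem metro_loop_eq (p : List (String × String) → Bool) (nm : List (String × String) → String) :
    ∀ (nd : List (List (String × String))) (f l : Option String),
      nd.foldl
        (fun st entry =>
          if p entry then ((if st.1 = none then some (nm entry) else st.1), some (nm entry)) else st)
        (f, l)
      = ((if f = none then ((nd.filter p).map nm).head? else f),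
         if (nd.filter p).map nm = [] then l else ((nd.filter p).map nm).getLast?) := by
  intro nd
  induction nd with
  | nil => intro f l; simp
  | cons e t ih =>
    intro f l
    by_cases hp : p e
    · simp only [List.foldl_cons, hp, if_true, List.filter_cons_of_pos hp, List.map_cons]
      rw [ih]
      cases f with
      | none =>
        simp only [if_true]
        cases h : (t.filter p).map nm with
        | nil => simp
        | cons a as => simp [List.getLast?_cons_cons]
      | some x =>
        simp only [reduceCtorEq, if_false]
        cases h : (t.filter p).map nm with
        | nil => simp
        | cons a as => simp [List.getLast?_cons_cons]
    · simp only [List.foldl_cons, hp, if_false, Bool.false_eq_true,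
        List.filter_cons_of_neg (by simpa using hp)]
      exact ih f l

-- the match list of a segment, for a given lowered target
def metroMs (target : String) (seg : List (List (String × String))) : List String :=
  (seg.filter (fun entry => PySem.Str.lower ((entry.lookup "line").getD "") == target)).map
    (fun entry => (entry.lookup "name").getD "")

theorem metroMs_append (target : String) (l r : List (List (String × String))) :
    metroMs target (l ++ r) = metroMs target l ++ metroMs target r := by
  simp [metroMs]

-- B's divide-and-conquer returns (head?, getLast?) of the match list.
theorem metroSolve_eq (target : String) :
    ∀ seg, metroSolve target seg = ((metroMs target seg).head?, (metroMs target seg).getLast?) := by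
  intro seg
  induction seg using metroSolve.induct target with
  | case1 => simp [metroSolve, metroMs]
  | case2 e hp => simp [metroSolve, metroMs, hp]
  | case3 e hp => simp [metroSolve, metroMs, hp]
  | case4 a b t lf ll rf rl hr2 hl2 ihl ihr =>
    rw [metroSolve, hl2, hr2]
    rw [hl2] at ihl; rw [hr2] at ihr
    injection ihl with hlf hll
    injection ihr with hrf hrl
    subst hlf hll hrf hrl
    have hsplit : metroMs target (a :: b :: t)
        = metroMs target ((a :: b :: t).take ((a :: b :: t).length / 2))
          ++ metroMs target ((a :: b :: t).drop ((a :: b :: t).length / 2)) := by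
      rw [← metroMs_append, List.take_append_drop]
    rw [hsplit]
    cases hl : metroMs target ((a :: b :: t).take ((a :: b :: t).length / 2)) with
    | nil =>
      simp
      intro h
      rw [h]
      rfl
    | cons x xs =>
      cases hr : metroMs target ((a :: b :: t).drop ((a :: b :: t).length / 2)) with
      | nil => simp
      | cons y ys =>
        obtain ⟨z, hz⟩ : ∃ z, (y :: ys).getLast? = some z := by
          cases hzz : (y :: ys).getLast? with
          | none => simp at hzz
          | some z => exact ⟨z, rfl⟩
        have happ : (x :: (xs ++ y :: ys)).getLast? = ((y :: ys).getLast?).or (x :: xs).getLast? := by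
          rw [show (x :: (xs ++ y :: ys)) = (x :: xs) ++ (y :: ys) by simp, List.getLast?_append]
        simp [happ, hz]

-- ===== VERDICT (by name: the statement is the Claim_ definition above) =====
theorem metro_start_spec : Claim_equal_metro_start := by
  intro nd ml _ _
  unfold Spec_metro_start metro_start metro_start_alt
  rw [metro_loop_eq
    (fun entry => PySem.Str.lower ((entry.lookup "line").getD "") == PySem.Str.lower ml)
    (fun entry => (entry.lookup "name").getD "") nd none none]
  rw [metroSolve_eq]
  have hms : (nd.filter (fun entry => PySem.Str.lower ((entry.lookup "line").getD "") == PySem.Str.lower ml)).map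
      (fun entry => (entry.lookup "name").getD "") = metroMs (PySem.Str.lower ml) nd := rfl
  rw [hms]
  cases h : metroMs (PySem.Str.lower ml) nd with
  | nil => simp
  | cons a as => simp
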